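-- pv_equiv track=rewrite | github.com/Exitsoftware/CSE1017 | Day7/2.py | trasrate
-- ===== SOURCE A (Python) =====
-- def trasrate(pos, num, board):
-- 	x_pos = 0
-- 	for i in board:
-- 		y_pos = 0
-- 		for j in i:
-- 			if(x_pos == pos[0] and y_pos == pos[1]):
-- 				board[x_pos][y_pos] = num
-- 			y_pos = y_pos + 1
-- 		x_pos = x_pos + 1
-- 	return board
-- ===== SOURCE B (Python) =====
-- def trasrate(pos, num, board):
--     # Single bounds-checked assignment instead of scanning every cell.
--     # Mutates board in place, like A. Requires len(pos) >= 2.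
--     x, y = pos[0], pos[1]
--     if 0 <= x < len(board) and 0 <= y < len(board[x]):
--         board[x][y] = num
--     return board
-- ===== Notes on version B (the rewrite author's own statement) =====
-- stated objective: simpler
-- what changed: B replaces A's scan over every cell of the board with a single bounds-checked direct assignment board[pos[0]][pos[1]] = num.
-- outside the precondition, e.g. on trasrate([], 5, []): A returns [], B raises IndexError; on trasrate([1], 5, [[1]]): A returns [[1]], B raises IndexError
import Mathlib
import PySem

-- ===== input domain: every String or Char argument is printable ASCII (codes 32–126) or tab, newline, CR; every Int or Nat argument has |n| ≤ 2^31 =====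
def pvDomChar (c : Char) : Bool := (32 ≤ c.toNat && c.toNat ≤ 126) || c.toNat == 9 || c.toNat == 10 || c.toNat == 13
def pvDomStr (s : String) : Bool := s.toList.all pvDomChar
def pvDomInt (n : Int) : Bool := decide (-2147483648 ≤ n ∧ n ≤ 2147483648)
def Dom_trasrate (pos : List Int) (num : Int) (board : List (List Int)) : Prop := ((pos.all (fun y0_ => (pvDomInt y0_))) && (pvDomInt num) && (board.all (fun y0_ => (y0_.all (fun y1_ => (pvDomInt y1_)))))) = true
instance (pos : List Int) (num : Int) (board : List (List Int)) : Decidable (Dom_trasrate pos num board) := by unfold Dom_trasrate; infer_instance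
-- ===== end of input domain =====

-- B sets the single cell (pos[0], pos[1]) directly with a bounds check instead of scanning every
-- cell; objective: simpler. Both A and B mutate 'board' in place in Python; the equivalence here
-- is about the returned value (which is that same board).

-- ===== PORT A =====
-- A's nested loops over rows and cells, carrying (board, x_pos) / (board, y_pos) as the loop state.
-- pos[0]/pos[1] are ported with pyGetD; exact when 2 ≤ pos.length (Pre_): with a shorter pos the
-- Python can raise IndexError.
def trasrate (pos : List Int) (num : Int) (board : List (List Int)) : List (List Int) :=
  (board.foldl
    (fun (st : List (List Int) × Int) (i : List Int) =>
      let x_pos := st.2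
      let inner := i.foldl
        (fun (st2 : List (List Int) × Int) (_j : Int) =>
          let bd2 := st2.1
          let y_pos := st2.2
          let bd3 :=
            if x_pos = PySem.List.pyGetD pos 0 0 ∧ y_pos = PySem.List.pyGetD pos 1 0 then
              bd2.set x_pos.toNat ((bd2.getD x_pos.toNat []).set y_pos.toNat num)
            else bd2
          (bd3, y_pos + 1))
        (st.1, (0 : Int))
      (inner.1, x_pos + 1))
    (board, (0 : Int))).1

-- ===== PORT B =====
-- pos[0]/pos[1] via pyGetD; exact when 2 ≤ pos.length (Pre_): B's Python raises IndexError otherwise.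
def trasrate_alt (pos : List Int) (num : Int) (board : List (List Int)) : List (List Int) :=
  let x := PySem.List.pyGetD pos 0 0
  let y := PySem.List.pyGetD pos 1 0
  if 0 ≤ x ∧ x < board.length ∧ 0 ≤ y ∧ y < (board.getD x.toNat []).length then
    board.set x.toNat ((board.getD x.toNat []).set y.toNat num)
  else board

-- ===== PRECONDITION & SPEC =====
-- Pre_ requires pos to carry at least two coordinates. With fewer, A raises IndexError as soon as
-- the scan reaches a cell where pos[0] (or, after a first-coordinate match, pos[1]) is read; the
-- inputs it excludes on which A still returns (empty/short pos that the scan never fully indexes,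
-- e.g. an all-empty board) are corners where A's no-op is an accident of short-circuit evaluation,
-- and B raises there.
def Pre_trasrate (pos : List Int) (num : Int) (board : List (List Int)) : Prop :=
  2 ≤ pos.length
instance (pos : List Int) (num : Int) (board : List (List Int)) : Decidable (Pre_trasrate pos num board) := by unfold Pre_trasrate; infer_instance

def pvWitness_trasrate : List Int × Int × List (List Int) := ([0, 1], 7, [[1, 2], [3, 4]])

def Spec_trasrate (pos : List Int) (num : Int) (board : List (List Int)) (out : List (List Int)) : Prop := out = trasrate_alt pos num board
instance (pos : List Int) (num : Int) (board : List (List Int)) (out : List (List Int)) : Decidable (Spec_trasrate pos num board out) := by unfold Spec_trasrate; infer_instance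

-- ===== CLAIM (what is proved, stated in full; the proofs are below) =====
def Claim_equal_trasrate : Prop := ∀ (pos : List Int) (num : Int) (board : List (List Int)), Dom_trasrate pos num board → Pre_trasrate pos num board → Spec_trasrate pos num board (trasrate pos num board)

-- ===== LEMMAS AND PROOFS =====

-- the single-cell update both programs perform
def pvSetCell (px py num : Int) (bd : List (List Int)) : List (List Int) :=
  bd.set px.toNat ((bd.getD px.toNat []).set py.toNat num)

-- inner loop of A: scans one row; fires exactly when x_pos = px and py is the visited y index
theorem pv_inner (px py num x_pos : Int) (row : List Int) (bd : List (List Int)) (y0 : Int) :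
    row.foldl
      (fun (st2 : List (List Int) × Int) (_j : Int) =>
        let bd2 := st2.1
        let y_pos := st2.2
        let bd3 :=
          if x_pos = px ∧ y_pos = py then
            bd2.set x_pos.toNat ((bd2.getD x_pos.toNat []).set y_pos.toNat num)
          else bd2
        (bd3, y_pos + 1)) (bd, y0)
    = (if x_pos = px ∧ y0 ≤ py ∧ py < y0 + row.length then pvSetCell px py num bd else bd,
       y0 + row.length) := by
  induction row generalizing bd y0 with
  | nil =>
    simp only [List.foldl_nil, List.length_nil, Nat.cast_zero, add_zero]
    rw [if_neg (by omega)]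
  | cons a row ih =>
    simp only [List.foldl_cons]
    rw [ih]
    simp only [List.length_cons, Nat.cast_add, Nat.cast_one, Prod.mk.injEq]
    refine ⟨?_, by ring⟩
    by_cases h0 : x_pos = px ∧ y0 = py
    · obtain ⟨hx, hy⟩ := h0
      subst hx; subst hy
      rw [if_neg (show ¬(x_pos = x_pos ∧ y0 + 1 ≤ y0 ∧ y0 < y0 + 1 + (row.length : Int)) by omega),
          if_pos (show x_pos = x_pos ∧ y0 = y0 from ⟨rfl, rfl⟩),
          if_pos (show x_pos = x_pos ∧ y0 ≤ y0 ∧ y0 < y0 + ((row.length : Int) + 1) by omega)]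
      rfl
    · rw [if_neg h0]
      by_cases hC : x_pos = px ∧ y0 + 1 ≤ py ∧ py < y0 + 1 + (row.length : Int)
      · rw [if_pos hC,
            if_pos (show x_pos = px ∧ y0 ≤ py ∧ py < y0 + ((row.length : Int) + 1) from
              ⟨hC.1, by omega, by omega⟩)]
      · rw [if_neg hC,
            if_neg (show ¬(x_pos = px ∧ y0 ≤ py ∧ py < y0 + ((row.length : Int) + 1)) by omega)]

theorem pv_outer (px py num : Int) (rows : List (List Int)) (bd : List (List Int)) (x0 : Int) :
    rows.foldl
      (fun (st : List (List Int) × Int) (i : List Int) =>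
        let x_pos := st.2
        let inner := i.foldl
          (fun (st2 : List (List Int) × Int) (_j : Int) =>
            let bd2 := st2.1
            let y_pos := st2.2
            let bd3 :=
              if x_pos = px ∧ y_pos = py then
                bd2.set x_pos.toNat ((bd2.getD x_pos.toNat []).set y_pos.toNat num)
              else bd2
            (bd3, y_pos + 1)) (st.1, (0 : Int))
        (inner.1, x_pos + 1)) (bd, x0)
    = (if x0 ≤ px ∧ px < x0 + rows.length ∧ 0 ≤ py ∧ py < (rows.getD (px - x0).toNat []).length
       then pvSetCell px py num bd else bd,
       x0 + rows.length) := by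
  induction rows generalizing bd x0 with
  | nil =>
    simp only [List.foldl_nil, List.length_nil, Nat.cast_zero, add_zero]
    rw [if_neg (by omega)]
  | cons r rows ih =>
    simp only [List.foldl_cons]
    rw [pv_inner px py num x0 r bd 0, ih]
    simp only [zero_add, List.length_cons, Nat.cast_add, Nat.cast_one, Prod.mk.injEq]
    refine ⟨?_, by ring⟩
    by_cases hx : x0 = px
    · subst hx
      rw [show (x0 - x0).toNat = 0 by omega]
      simp only [List.getD_cons_zero]
      rw [if_neg (show ¬(x0 + 1 ≤ x0 ∧ x0 < x0 + 1 + (rows.length : Int) ∧ 0 ≤ py ∧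
            py < ((rows.getD (x0 - (x0 + 1)).toNat []).length : Int)) by omega)]
      by_cases hy : 0 ≤ py ∧ py < (r.length : Int)
      · rw [if_pos (show True ∧ 0 ≤ py ∧ py < (r.length : Int) from ⟨trivial, hy⟩),
            if_pos (show x0 ≤ x0 ∧ x0 < x0 + ((rows.length : Int) + 1) ∧ 0 ≤ py ∧
              py < (r.length : Int) by omega)]
      · rw [if_neg (show ¬(True ∧ 0 ≤ py ∧ py < (r.length : Int)) by simpa using hy),
            if_neg (show ¬(x0 ≤ x0 ∧ x0 < x0 + ((rows.length : Int) + 1) ∧ 0 ≤ py ∧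
              py < (r.length : Int)) by omega)]
    · rw [if_neg (show ¬(x0 = px ∧ 0 ≤ py ∧ py < (r.length : Int)) by omega)]
      by_cases hlt : x0 < px
      · rw [show (px - x0).toNat = (px - (x0 + 1)).toNat + 1 by omega]
        simp only [List.getD_cons_succ]
        by_cases hC : x0 + 1 ≤ px ∧ px < x0 + 1 + (rows.length : Int) ∧ 0 ≤ py ∧
            py < ((rows.getD (px - (x0 + 1)).toNat []).length : Int)
        · rw [if_pos hC,
              if_pos (show x0 ≤ px ∧ px < x0 + ((rows.length : Int) + 1) ∧ 0 ≤ py ∧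
                py < ((rows.getD (px - (x0 + 1)).toNat []).length : Int) from
                  ⟨by omega, by omega, hC.2.2⟩)]
        · rw [if_neg hC,
              if_neg (show ¬(x0 ≤ px ∧ px < x0 + ((rows.length : Int) + 1) ∧ 0 ≤ py ∧
                py < ((rows.getD (px - (x0 + 1)).toNat []).length : Int)) by omega)]
      · rw [if_neg (show ¬(x0 + 1 ≤ px ∧ px < x0 + 1 + (rows.length : Int) ∧ 0 ≤ py ∧
              py < ((rows.getD (px - (x0 + 1)).toNat []).length : Int)) by omega),
            if_neg (show ¬(x0 ≤ px ∧ px < x0 + ((rows.length : Int) + 1) ∧ 0 ≤ py ∧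
              py < (((r :: rows).getD (px - x0).toNat []).length : Int)) by omega)]

-- ===== VERDICT (by name: the statement is the Claim_ definition above) =====
theorem trasrate_spec : Claim_equal_trasrate := by
  intro pos num board _ _
  unfold Spec_trasrate trasrate trasrate_alt
  rw [pv_outer (PySem.List.pyGetD pos 0 0) (PySem.List.pyGetD pos 1 0) num board board 0]
  simp only [zero_add, Int.sub_zero, pvSetCell]
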